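-- pv_equiv track=rewrite | github.com/emiresenov/advent-of-code | 2024/day2/part1.py | safety
-- ===== SOURCE A (Python) =====
-- sign = lambda x: (True, False)[x<0]
--
-- def safety(arr):
--     val_prev=arr[0]
--     sign_prev=sign(arr[0]-arr[1])
--     for i in range(1,len(arr)):
--         val=arr[i]
--         diff = val_prev-val
--         if(abs(diff) not in range(1,4) or sign(diff)!=sign_prev):
--             return False
--         val_prev = val
--         sign_prev=sign(diff)
--     return True
-- ===== SOURCE B (Python) =====
-- def safety(arr):
--     diffs = [b - a for a, b in zip(arr, arr[1:])]
--     return (all(1 <= abs(d) <= 3 for d in diffs)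
--             and (all(d > 0 for d in diffs) or all(d < 0 for d in diffs)))
-- ===== Notes on version B (the rewrite author's own statement) =====
-- stated objective: idiomatic
-- what changed: Replaces A's single stateful index loop threading val_prev/sign_prev with building the list of consecutive differences once and checking it with three global all() predicates (step size 1-3, and all-increasing or all-decreasing).
-- outside the precondition, e.g. on safety([5]): A raises IndexError, B returns True; on safety([]): A raises IndexError, B returns True
-- crash fix: On lists of length 0 or 1 A raises IndexError (arr[0]/arr[1]); B returns True (vacuously safe report). — e.g. on safety([5]): A raises IndexError, B returns true
import Mathlib
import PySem

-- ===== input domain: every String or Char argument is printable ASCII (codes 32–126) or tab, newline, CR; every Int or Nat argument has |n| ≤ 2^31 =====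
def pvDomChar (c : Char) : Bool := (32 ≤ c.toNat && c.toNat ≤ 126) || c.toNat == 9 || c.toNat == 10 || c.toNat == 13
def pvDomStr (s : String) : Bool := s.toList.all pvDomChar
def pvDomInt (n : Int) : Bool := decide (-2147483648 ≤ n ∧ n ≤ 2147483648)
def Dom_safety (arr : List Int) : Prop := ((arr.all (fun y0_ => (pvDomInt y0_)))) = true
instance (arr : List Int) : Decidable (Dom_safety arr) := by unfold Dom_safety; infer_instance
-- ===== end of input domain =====

-- B replaces A's single stateful pass by a diffs list with global all-checks (idiomatic); return-value equivalence on lists of length ≥ 2.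

-- ===== PORT A =====
-- sign = lambda x: (True, False)[x<0]
def pySign (x : Int) : Bool := decide (0 ≤ x)

-- the for-loop: i over range(1, len(arr)), early 'return False' encoded by stopping the recursion
def safetyLoop (arr : List Int) (i : Nat) (val_prev : Int) (sign_prev : Bool) : Bool :=
  if h : i < arr.length then
    let val := arr[i]
    let diff := val_prev - val
    if ¬(1 ≤ |diff| ∧ |diff| ≤ 3) ∨ pySign diff ≠ sign_prev then false
    else safetyLoop arr (i + 1) val (pySign diff)
  else true
termination_by arr.length - i

def safety (arr : List Int) : Bool :=
  match PySem.List.pyGet? arr 0, PySem.List.pyGet? arr 1 with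
  | some a0, some a1 => safetyLoop arr 1 a0 (pySign (a0 - a1))
  | _, _ => false  -- IndexError in Python: excluded by Pre_safety

-- ===== PORT B =====
def safety_alt (arr : List Int) : Bool :=
  let diffs := (arr.zip (arr.drop 1)).map (fun p => p.2 - p.1)
  diffs.all (fun d => decide (1 ≤ |d| ∧ |d| ≤ 3)) &&
    (diffs.all (fun d => decide (0 < d)) || diffs.all (fun d => decide (d < 0)))

-- ===== PRECONDITION & SPEC =====
-- Pre_ excludes lists of length < 2, on which A raises IndexError (arr[0]/arr[1]).
def Pre_safety (arr : List Int) : Prop := 2 ≤ arr.length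
instance (arr : List Int) : Decidable (Pre_safety arr) := by unfold Pre_safety; infer_instance
def pvWitness_safety : List Int := [1, 2, 4]

-- On lists of length 0 or 1 A raises IndexError; B returns True (vacuously safe report).
def Raises_safety (arr : List Int) : Prop := arr.length < 2
instance (arr : List Int) : Decidable (Raises_safety arr) := by unfold Raises_safety; infer_instance
def pvRaiseWitness_safety : List Int := [5]
def pvRaiseWitnessOut_safety : Bool := true

def Spec_safety (arr : List Int) (out : Bool) : Prop := out = safety_alt arr
instance (arr : List Int) (out : Bool) : Decidable (Spec_safety arr out) := by unfold Spec_safety; infer_instance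

-- ===== CLAIM (what is proved, stated in full; the proofs are below) =====
def Claim_equal_safety : Prop := ∀ (arr : List Int), Dom_safety arr → Pre_safety arr → Spec_safety arr (safety arr)
def Claim_raises_safety : Prop := (∀ (arr : List Int), Dom_safety arr → Raises_safety arr → ¬ Pre_safety arr) ∧ (Dom_safety (pvRaiseWitness_safety) ∧ Raises_safety (pvRaiseWitness_safety) ∧ safety_alt (pvRaiseWitness_safety) = pvRaiseWitnessOut_safety)

-- ===== LEMMAS AND PROOFS =====

-- proof-side reformulation of A's loop as structural recursion over the tail
def checkTail (p : Int) (s : Bool) : List Int → Bool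
  | [] => true
  | v :: rest =>
    if ¬(1 ≤ |p - v| ∧ |p - v| ≤ 3) ∨ pySign (p - v) ≠ s then false
    else checkTail v (pySign (p - v)) rest

-- forward differences with a given previous value
def diffList (p : Int) : List Int → List Int
  | [] => []
  | v :: rest => (v - p) :: diffList v rest

theorem safetyLoop_eq_checkTail (l : List Int) : ∀ (arr : List Int) (i : Nat) (p : Int) (s : Bool),
    arr.drop i = l → safetyLoop arr i p s = checkTail p s l := by
  induction l with
  | nil =>
    intro arr i p s h
    have hi : arr.length ≤ i := by
      by_contra hlt
      push Not at hlt
      have := List.drop_eq_getElem_cons hlt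
      rw [h] at this
      simp at this
      omega
    rw [safetyLoop, dif_neg (by omega)]
    rfl
  | cons v rest ih =>
    intro arr i p s h
    have hi : i < arr.length := by
      by_contra hge
      push Not at hge
      rw [List.drop_eq_nil_of_le hge] at h
      simp at h
    have hvr : arr[i] = v ∧ arr.drop (i + 1) = rest := by
      have := List.drop_eq_getElem_cons hi
      rw [h] at this
      have := (List.cons.injEq _ _ _ _ ▸ this)
      exact ⟨this.1.symm, this.2.symm⟩
    rw [safetyLoop, dif_pos hi]
    simp only [hvr.1, checkTail]
    split
    · rfl
    · exact ih arr (i + 1) v _ hvr.2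

theorem pySign_neg (a b : Int) : pySign (a - b) = decide (b - a ≤ 0) := by
  unfold pySign; by_cases h : b - a ≤ 0 <;> simp [h] <;> omega

theorem checkTail_iff (l : List Int) : ∀ (p : Int) (s : Bool),
    checkTail p s l = true ↔
      ∀ d ∈ diffList p l, (1 ≤ |d| ∧ |d| ≤ 3) ∧ decide (d ≤ 0) = s := by
  induction l with
  | nil => intro p s; simp [checkTail, diffList]
  | cons v rest ih =>
    intro p s
    have habs : |p - v| = |v - p| := abs_sub_comm p v
    have hsign := pySign_neg p v
    rw [checkTail]
    split
    · rename_i hcond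
      simp only [Bool.false_eq_true, false_iff]
      intro hall
      obtain ⟨h1, h2⟩ := hall (v - p) (by simp [diffList])
      rcases hcond with hr | hs
      · rw [habs] at hr; exact hr h1
      · rw [hsign] at hs; exact hs h2
    · rename_i hcond
      push Not at hcond
      obtain ⟨hr, hs⟩ := hcond
      rw [habs] at hr
      rw [ih v (pySign (p - v)), hs]
      have hs' : decide (v - p ≤ 0) = s := by rw [← hsign]; exact hs
      simp only [diffList, List.forall_mem_cons]
      exact ⟨fun h => ⟨⟨hr, hs'⟩, h⟩, fun h => h.2⟩

theorem zip_diffs (l : List Int) : ∀ (p : Int),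
    ((p :: l).zip l).map (fun q => q.2 - q.1) = diffList p l := by
  induction l with
  | nil => intro p; rfl
  | cons v rest ih =>
    intro p
    simp only [List.zip_cons_cons, List.map_cons, diffList]
    exact congrArg _ (ih v)

theorem alt_iff (a : Int) (l : List Int) :
    safety_alt (a :: l) = true ↔
      (∀ d ∈ diffList a l, 1 ≤ |d| ∧ |d| ≤ 3) ∧
        ((∀ d ∈ diffList a l, 0 < d) ∨ (∀ d ∈ diffList a l, d < 0)) := by
  unfold safety_alt
  simp only [List.drop_succ_cons, List.drop_zero]
  rw [zip_diffs l a]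
  simp [List.all_eq_true]

theorem sign_chain_iff (d0 : Int) (ds : List Int) (hmem : d0 ∈ ds) :
    (∀ d ∈ ds, (1 ≤ |d| ∧ |d| ≤ 3) ∧ decide (d ≤ 0) = decide (d0 ≤ 0)) ↔
      (∀ d ∈ ds, 1 ≤ |d| ∧ |d| ≤ 3) ∧ ((∀ d ∈ ds, 0 < d) ∨ (∀ d ∈ ds, d < 0)) := by
  constructor
  · intro h
    refine ⟨fun d hd => (h d hd).1, ?_⟩
    by_cases h0 : d0 ≤ 0
    · right
      intro d hd
      obtain ⟨⟨h1, _⟩, h2⟩ := h d hd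
      rw [decide_eq_decide] at h2
      have := h2.mpr h0
      rcases abs_cases d with ⟨he, hd'⟩ | ⟨he, hd'⟩ <;> omega
    · left
      intro d hd
      obtain ⟨⟨h1, _⟩, h2⟩ := h d hd
      rw [decide_eq_decide] at h2
      have h3 : ¬ d ≤ 0 := fun hd0 => h0 (h2.mp hd0)
      omega
  · rintro ⟨hr, hpos | hneg⟩
    · intro d hd
      refine ⟨hr d hd, ?_⟩
      have h1 := hpos d hd
      have h2 := hpos d0 hmem
      rw [decide_eq_decide]
      omega
    · intro d hd
      refine ⟨hr d hd, ?_⟩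
      have h1 := hneg d hd
      have h2 := hneg d0 hmem
      rw [decide_eq_decide]
      omega

-- ===== VERDICT (by name: the statement is the Claim_ definition above) =====
theorem safety_spec : Claim_equal_safety := by
  intro arr _ hpre
  unfold Spec_safety
  match arr, hpre with
  | a :: b :: t, _ =>
    have hget0 : PySem.List.pyGet? (a :: b :: t) 0 = some a := by
      simp [PySem.List.pyGet?, PySem.List.pyIdx?]
      rw [if_pos (by positivity)]
      rfl
    have hget1 : PySem.List.pyGet? (a :: b :: t) 1 = some b := by
      simp [PySem.List.pyGet?, PySem.List.pyIdx?]
    have h1 : safety (a :: b :: t) = safetyLoop (a :: b :: t) 1 a (pySign (a - b)) := by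
      unfold safety
      rw [hget0, hget1]
    rw [h1, safetyLoop_eq_checkTail (b :: t) (a :: b :: t) 1 a _ rfl]
    rw [Bool.eq_iff_iff]
    rw [checkTail_iff (b :: t) a (pySign (a - b)), alt_iff a (b :: t)]
    rw [pySign_neg a b]
    have hd : diffList a (b :: t) = (b - a) :: diffList b t := rfl
    rw [hd] at *
    exact sign_chain_iff (b - a) ((b - a) :: diffList b t) List.mem_cons_self

@[simp] theorem safety_raises : Claim_raises_safety := by
  unfold Claim_raises_safety
  exact ⟨fun arr _ h hp => by unfold Raises_safety at h; unfold Pre_safety at hp; omega, by decide⟩
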